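-- pv_equiv track=rewrite | github.com/LeoGotardo/Math | Math.py | calc
-- ===== SOURCE A (Python) =====
-- def calc(pri):
--    n = 0
--    result = 1
--
--    while n < len(pri):
--       if pri[n].isdigit():
--          num_str = pri[n]
--          n += 1
--          while n < len(pri) and pri[n].isdigit():
--             num_str += pri[n]
--             n += 1
--          result = int(num_str) * result
--       else:
--          n += 1
--
--    return result
-- ===== SOURCE B (Python) =====
-- def calc(pri):
--     spaced = ''.join(c if c.isdigit() else ' ' for c in pri)
--     result = 1
--     for tok in spaced.split():
--         result *= int(tok)
--     return result
-- ===== Notes on version B (the rewrite author's own statement) =====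
-- stated objective: simpler
-- what changed: Replaces A's manual index/while scanner that builds digit substrings character by character with a staged pipeline: map non-digits to spaces, str.split() the masked string into tokens, multiply their int values.
import Mathlib
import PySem

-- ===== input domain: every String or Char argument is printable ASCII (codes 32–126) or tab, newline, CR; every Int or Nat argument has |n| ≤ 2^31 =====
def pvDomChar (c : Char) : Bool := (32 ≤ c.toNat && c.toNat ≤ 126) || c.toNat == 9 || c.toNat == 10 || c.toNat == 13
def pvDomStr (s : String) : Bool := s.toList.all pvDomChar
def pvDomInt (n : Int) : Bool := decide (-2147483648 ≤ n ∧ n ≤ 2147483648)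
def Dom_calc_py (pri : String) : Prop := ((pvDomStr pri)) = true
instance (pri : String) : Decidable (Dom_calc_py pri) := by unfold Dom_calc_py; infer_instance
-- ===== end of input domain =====

-- B replaces A's manual index/while scanner (which builds each digit substring by hand)
-- with a staged pipeline: mask non-digits to spaces, split() the masked string, multiply
-- the int values of the tokens; same return value on Dom (objective: simpler).

-- ===== PORT A =====
-- inner while loop of A: collect the digit run into num_str (acc), return (num_str, rest)
def pvTakeRun : List Char → List Char → List Char × List Char
  | [], acc => (acc, [])
  | c :: rest, acc =>
    if PySem.Chars.isdigit c then pvTakeRun rest (acc ++ [c]) else (acc, c :: rest)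

-- (cited by pvCalcLoop's decreasing_by, so it stays with the port)
theorem pvTakeRun_snd_len : ∀ (l acc : List Char), (pvTakeRun l acc).2.length ≤ l.length
  | [], _ => Nat.le_refl _
  | c :: rest, acc => by
    unfold pvTakeRun
    split
    · exact Nat.le_trans (pvTakeRun_snd_len rest (acc ++ [c])) (Nat.le_succ _)
    · exact Nat.le_refl _

-- outer while loop of A; int(num_str) is always defined here (nonempty digit run), so getD 0 is never used
def pvCalcLoop : List Char → Int → Int
  | [], result => result
  | c :: rest, result =>
    if PySem.Chars.isdigit c then
      let p := pvTakeRun rest [c]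
      pvCalcLoop p.2 ((PySem.Int.ofChars? p.1).getD 0 * result)
    else pvCalcLoop rest result
termination_by l _ => l.length
decreasing_by
  · exact Nat.lt_succ_of_le (pvTakeRun_snd_len rest [c])
  · exact Nat.lt_succ_of_le (Nat.le_refl _)

def calc_py (pri : String) : Int := pvCalcLoop pri.toList 1

-- ===== PORT B =====
-- ''.join(c if c.isdigit() else ' ' for c in pri)
def pvMask (l : List Char) : List Char :=
  l.map (fun c => if PySem.Chars.isdigit c then c else ' ')

-- for tok in spaced.split(): result *= int(tok)   — every token is a nonempty digit run, so getD 0 is never used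
def calc_py_alt (pri : String) : Int :=
  (PySem.Chars.split₀ (pvMask pri.toList)).foldl
    (fun result tok => result * (PySem.Int.ofChars? tok).getD 0) 1

-- ===== PRECONDITION & SPEC =====
def Spec_calc_py (pri : String) (out : Int) : Prop := out = calc_py_alt pri
instance (pri : String) (out : Int) : Decidable (Spec_calc_py pri out) := by unfold Spec_calc_py; infer_instance

-- ===== CLAIM (what is proved, stated in full; the proofs are below) =====
def Claim_equal_calc_py : Prop := ∀ (pri : String), Dom_calc_py pri → Spec_calc_py pri (calc_py pri)

-- ===== LEMMAS AND PROOFS =====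

-- a decimal digit is not Python whitespace
theorem pv_digit_not_space (c : Char) (h : PySem.Chars.isdigit c = true) :
    PySem.Chars.isspace c = false := by
  simp [PySem.Chars.isdigit, Char.le_def, UInt32.le_iff_toNat_le] at h
  unfold PySem.Chars.isspace
  simp only [Bool.or_eq_false_iff, Bool.and_eq_false_iff, decide_eq_false_iff_not]
  omega

theorem pvTakeRun_eq : ∀ (l acc : List Char),
    pvTakeRun l acc = (acc ++ l.takeWhile PySem.Chars.isdigit, l.dropWhile PySem.Chars.isdigit)
  | [], acc => by simp [pvTakeRun]
  | c :: rest, acc => by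
    unfold pvTakeRun
    by_cases h : PySem.Chars.isdigit c
    · simp [h, pvTakeRun_eq rest (acc ++ [c])]
    · simp only [Bool.not_eq_true] at h
      simp [h]

-- the maximal digit runs A's outer loop visits, in order
def pvRuns : List Char → List (List Char)
  | [] => []
  | c :: rest =>
    if PySem.Chars.isdigit c then
      (pvTakeRun rest [c]).1 :: pvRuns (pvTakeRun rest [c]).2
    else pvRuns rest
termination_by l => l.length
decreasing_by
  · exact Nat.lt_succ_of_le (pvTakeRun_snd_len rest [c])
  · exact Nat.lt_succ_of_le (Nat.le_refl _)

theorem pvCalcLoop_eq_runs : ∀ (l : List Char) (r : Int),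
    pvCalcLoop l r = (pvRuns l).foldl (fun r t => (PySem.Int.ofChars? t).getD 0 * r) r
  | [], r => by rw [pvCalcLoop, pvRuns]; rfl
  | c :: rest, r => by
    rw [pvCalcLoop, pvRuns]
    by_cases h : PySem.Chars.isdigit c
    · simp only [h, if_true, List.foldl_cons]
      exact pvCalcLoop_eq_runs (pvTakeRun rest [c]).2 _
    · simp only [h, Bool.false_eq_true, if_false]
      exact pvCalcLoop_eq_runs rest r
termination_by l _ => l.length
decreasing_by
  · exact Nat.lt_succ_of_le (pvTakeRun_snd_len rest [c])
  · exact Nat.lt_succ_of_le (Nat.le_refl _)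

-- multiplying from the left or the right gives the same product
theorem pv_foldl_mul_comm (g : List Char → Int) : ∀ (L : List (List Char)) (r : Int),
    L.foldl (fun r t => g t * r) r = L.foldl (fun r t => r * g t) r
  | [], _ => rfl
  | t :: L, r => by
    simp only [List.foldl_cons]
    rw [pv_foldl_mul_comm g L (g t * r), mul_comm (g t) r]

theorem pv_go_nil (cur : List Char) (acc : List (List Char)) :
    PySem.Chars.split₀.go [] cur acc =
      if cur.isEmpty then acc.reverse else (cur.reverse :: acc).reverse := by
  rw [PySem.Chars.split₀.go]

theorem pv_go_cons (c : Char) (rest cur : List Char) (acc : List (List Char)) :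
    PySem.Chars.split₀.go (c :: rest) cur acc =
      if PySem.Chars.isspace c then
        (if cur.isEmpty then PySem.Chars.split₀.go rest [] acc
         else PySem.Chars.split₀.go rest [] (cur.reverse :: acc))
      else PySem.Chars.split₀.go rest (c :: cur) acc := by
  rw [PySem.Chars.split₀.go]

-- the collected-tokens accumulator of split().go just prefixes the result
theorem pv_go_acc : ∀ (l cur : List Char) (acc : List (List Char)),
    PySem.Chars.split₀.go l cur acc = acc.reverse ++ PySem.Chars.split₀.go l cur []
  | [], cur, acc => by
    rw [pv_go_nil, pv_go_nil]
    by_cases h : cur.isEmpty <;> simp [h]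
  | c :: rest, cur, acc => by
    rw [pv_go_cons, pv_go_cons]
    by_cases hs : PySem.Chars.isspace c
    · by_cases h : cur.isEmpty
      · simp only [hs, h, if_true]
        exact pv_go_acc rest [] acc
      · simp only [hs, h, if_true]
        rw [pv_go_acc rest [] (cur.reverse :: acc), pv_go_acc rest [] [cur.reverse]]
        simp
    · simp only [hs]
      exact pv_go_acc rest (c :: cur) acc

-- inside a digit run: split().go on the masked string finishes the current token at the run's end
theorem pv_go_mask_run : ∀ (l cur : List Char), cur ≠ [] →
    PySem.Chars.split₀.go (pvMask l) cur [] =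
      (cur.reverse ++ l.takeWhile PySem.Chars.isdigit) ::
        PySem.Chars.split₀.go (pvMask (l.dropWhile PySem.Chars.isdigit)) [] []
  | [], cur, hcur => by
    simp only [List.takeWhile_nil, List.dropWhile_nil]
    rw [show pvMask [] = [] from rfl, pv_go_nil, pv_go_nil]
    simp [List.isEmpty_iff, hcur]
  | c :: rest, cur, hcur => by
    by_cases h : PySem.Chars.isdigit c
    · rw [show pvMask (c :: rest) = c :: pvMask rest by simp [pvMask, h]]
      rw [pv_go_cons, pv_digit_not_space c h]
      simp only [if_false, Bool.false_eq_true]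
      rw [pv_go_mask_run rest (c :: cur) (by simp)]
      simp [h]
    · simp only [Bool.not_eq_true] at h
      rw [show pvMask (c :: rest) = ' ' :: pvMask rest by simp [pvMask, h]]
      rw [pv_go_cons]
      simp only [show PySem.Chars.isspace ' ' = true from rfl, if_true,
        List.isEmpty_iff, hcur, if_false]
      rw [pv_go_acc (pvMask rest) [] [cur.reverse]]
      simp only [List.takeWhile_cons, List.dropWhile_cons, h, Bool.false_eq_true, if_false]
      rw [show pvMask (c :: rest) = ' ' :: pvMask rest by simp [pvMask, h]]
      rw [pv_go_cons]
      simp [show PySem.Chars.isspace ' ' = true from rfl]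

-- split() of the masked string yields exactly A's digit runs
theorem pv_split_mask_eq_runs : ∀ (l : List Char),
    PySem.Chars.split₀.go (pvMask l) [] [] = pvRuns l
  | [] => by rw [show pvMask [] = [] from rfl, pv_go_nil, pvRuns]; rfl
  | c :: rest => by
    rw [pvRuns]
    by_cases h : PySem.Chars.isdigit c
    · rw [show pvMask (c :: rest) = c :: pvMask rest by simp [pvMask, h]]
      rw [pv_go_cons, pv_digit_not_space c h]
      simp only [if_false, Bool.false_eq_true]
      rw [pv_go_mask_run rest [c] (by simp)]
      rw [pv_split_mask_eq_runs (rest.dropWhile PySem.Chars.isdigit)]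
      simp [h, pvTakeRun_eq]
    · simp only [Bool.not_eq_true] at h
      rw [show pvMask (c :: rest) = ' ' :: pvMask rest by simp [pvMask, h]]
      rw [pv_go_cons]
      simp only [show PySem.Chars.isspace ' ' = true from rfl, if_true, List.isEmpty_nil, if_true]
      rw [pv_split_mask_eq_runs rest]
      simp [h]
termination_by l => l.length
decreasing_by
  · exact Nat.lt_succ_of_le (List.length_dropWhile_le _ _)
  · exact Nat.lt_succ_of_le (Nat.le_refl _)

-- ===== VERDICT (by name: the statement is the Claim_ definition above) =====
theorem calc_py_spec : Claim_equal_calc_py := by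
  intro pri _
  unfold Spec_calc_py calc_py calc_py_alt
  rw [pvCalcLoop_eq_runs, pv_foldl_mul_comm]
  rw [show PySem.Chars.split₀ (pvMask pri.toList) =
        PySem.Chars.split₀.go (pvMask pri.toList) [] [] from rfl]
  rw [pv_split_mask_eq_runs]
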